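-- pv_equiv track=rewrite | github.com/einlang/einlang | src/einlang/backends/numpy_expressions.py | _infer_reduction_axes_from_shape
-- ===== SOURCE A (Python) =====
-- from typing import Any, Dict, List, Optional, Tuple
--
-- def _infer_reduction_axes_from_shape(
--     shape: Tuple[int, ...], reduction_sizes: List[int]
-- ) -> Optional[Tuple[int, ...]]:
--     used: set = set()
--     axes: List[int] = []
--     for rs in reduction_sizes:
--         found = None
--         for i, s in enumerate(shape):
--             if i not in used and int(s) == int(rs):
--                 found = i
--                 break
--         if found is None:
--             return None
--         axes.append(found)
--         used.add(found)
--     return tuple(axes)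
-- ===== SOURCE B (Python) =====
-- def _infer_reduction_axes_from_shape(shape, reduction_sizes):
--     # Index shape axes by size once, then answer each reduction size by
--     # popping (via a cursor) the next unused axis of that size: O(n+m).
--     occ = {}
--     for i, s in enumerate(shape):
--         occ.setdefault(int(s), []).append(i)
--     seen = {}
--     axes = []
--     for rs in reduction_sizes:
--         k = seen.get(int(rs), 0)
--         lst = occ.get(int(rs), [])
--         if k >= len(lst):
--             return None
--         axes.append(lst[k])
--         seen[int(rs)] = k + 1
--     return tuple(axes)
-- ===== Notes on version B (the rewrite author's own statement) =====
-- stated objective: faster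
-- what changed: Replaces A's per-reduction-size rescan of the whole shape (with a 'used' set) by a one-pass index of axes grouped by size plus a per-size cursor, so each reduction size is answered in O(1).
import Mathlib
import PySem

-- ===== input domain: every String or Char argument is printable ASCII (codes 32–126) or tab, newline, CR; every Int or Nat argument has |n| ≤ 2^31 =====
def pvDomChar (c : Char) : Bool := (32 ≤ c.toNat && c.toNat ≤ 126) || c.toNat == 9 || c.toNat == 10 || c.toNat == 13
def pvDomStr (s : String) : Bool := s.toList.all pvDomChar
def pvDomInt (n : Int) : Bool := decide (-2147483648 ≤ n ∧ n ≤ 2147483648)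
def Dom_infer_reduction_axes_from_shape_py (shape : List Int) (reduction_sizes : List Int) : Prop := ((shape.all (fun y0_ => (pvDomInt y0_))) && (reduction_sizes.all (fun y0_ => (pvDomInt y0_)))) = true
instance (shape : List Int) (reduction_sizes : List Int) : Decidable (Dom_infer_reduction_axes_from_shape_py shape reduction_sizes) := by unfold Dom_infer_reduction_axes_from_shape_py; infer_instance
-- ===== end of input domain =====

-- B groups the shape's axis indices by size in one pass and then answers each
-- reduction size via a per-size cursor instead of A's rescan of the whole shape.

-- ===== PORT A =====
-- A's outer loop over reduction_sizes; per step, the inner loop 'for i, s in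
-- enumerate(shape): if i not in used and int(s) == int(rs): found = i; break'
-- is the first match on the enumerated shape.
def pvGoA (shape : List Int) : List Int → PySem.Set Int → List Int → Option (List Int)
  | [], _, axes => some axes
  | rs :: rest, used, axes =>
    match (PySem.List.enumerate shape 0).find? (fun p => !(PySem.Set.contains used p.1) && p.2 == rs) with
    | none => none
    | some p => pvGoA shape rest (PySem.Set.add used p.1) (axes ++ [p.1])

def infer_reduction_axes_from_shape_py (shape : List Int) (reduction_sizes : List Int) : Option (List Int) :=
  pvGoA shape reduction_sizes PySem.Set.empty []

-- ===== PORT B =====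
-- occ.setdefault(int(s), []).append(i)  ≡  occ[s] := occ.get(s, []) ++ [i]  (key keeps its position)
def pvBuildOcc (shape : List Int) : PySem.Dict Int (List Int) :=
  (PySem.List.enumerate shape 0).foldl (fun d p => d.modify p.2 [] (fun l => l ++ [p.1])) PySem.Dict.empty

-- B's loop over reduction_sizes: cursor k into the queue lst of axes of that size.
-- lst[k] is read with pyGetD under the guard k < len(lst), 0 ≤ k: exact there.
def pvGoB (occ : PySem.Dict Int (List Int)) : List Int → PySem.Dict Int Int → List Int → Option (List Int)
  | [], _, axes => some axes
  | rs :: rest, seen, axes =>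
    let k := seen.getD rs 0
    let lst := occ.getD rs []
    if (lst.length : Int) ≤ k then none
    else pvGoB occ rest (seen.insert rs (k + 1)) (axes ++ [PySem.List.pyGetD lst k 0])

def infer_reduction_axes_from_shape_py_alt (shape : List Int) (reduction_sizes : List Int) : Option (List Int) :=
  pvGoB (pvBuildOcc shape) reduction_sizes PySem.Dict.empty []

-- ===== PRECONDITION & SPEC =====
def Spec_infer_reduction_axes_from_shape_py (shape : List Int) (reduction_sizes : List Int) (out : Option (List Int)) : Prop := out = infer_reduction_axes_from_shape_py_alt shape reduction_sizes
instance (shape : List Int) (reduction_sizes : List Int) (out : Option (List Int)) : Decidable (Spec_infer_reduction_axes_from_shape_py shape reduction_sizes out) := by unfold Spec_infer_reduction_axes_from_shape_py; infer_instance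

-- ===== CLAIM (what is proved, stated in full; the proofs are below) =====
def Claim_equal_infer_reduction_axes_from_shape_py : Prop := ∀ (shape : List Int) (reduction_sizes : List Int), Dom_infer_reduction_axes_from_shape_py shape reduction_sizes → Spec_infer_reduction_axes_from_shape_py shape reduction_sizes (infer_reduction_axes_from_shape_py shape reduction_sizes)

-- ===== LEMMAS AND PROOFS =====

/-- The (ordered) list of axis indices of `shape` whose size is `v`. -/
def pvOcc (shape : List Int) (v : Int) : List Int :=
  ((PySem.List.enumerate shape 0).filter (fun p => p.2 == v)).map Prod.fst

theorem pvBuildOcc_getD_aux (l : List (Int × Int)) (d : PySem.Dict Int (List Int)) (v : Int) :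
    (l.foldl (fun d p => d.modify p.2 [] (fun t => t ++ [p.1])) d).getD v []
      = d.getD v [] ++ (l.filter (fun p => p.2 == v)).map Prod.fst := by
  induction l generalizing d with
  | nil => simp
  | cons p rest ih =>
    simp only [List.foldl_cons, ih, List.filter_cons]
    rw [PySem.Dict.getD_modify]
    by_cases h : p.2 = v
    · simp [h]
    · simp [h, Ne.symm h]

theorem pvOcc_getD (shape : List Int) (v : Int) :
    (pvBuildOcc shape).getD v [] = pvOcc shape v := by
  unfold pvBuildOcc pvOcc
  rw [pvBuildOcc_getD_aux]
  simp

/-- An index occurs for at most one size. -/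
theorem pvOcc_val_unique (shape : List Int) {i v v' : Int}
    (h : i ∈ pvOcc shape v) (h' : i ∈ pvOcc shape v') : v = v' := by
  unfold pvOcc at h h'
  simp only [List.mem_map, List.mem_filter] at h h'
  obtain ⟨p, ⟨hp, hpv⟩, hpi⟩ := h
  obtain ⟨q, ⟨hq, hqv⟩, hqi⟩ := h'
  rw [PySem.List.mem_enumerate_iff] at hp hq
  obtain ⟨k, hk, rfl⟩ := hp
  obtain ⟨k', hk', rfl⟩ := hq
  simp only [beq_iff_eq] at hpi hqi hpv hqv
  have hkk : k = k' := by omega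
  subst hkk
  rw [← hpv, ← hqv]

theorem pvOcc_pairwise (shape : List Int) (v : Int) : (pvOcc shape v).Pairwise (· < ·) := by
  unfold pvOcc
  exact ((PySem.List.pairwise_lt_enumerate shape 0).filter _).map _ (fun _ _ h => h)

theorem pvOcc_nodup (shape : List Int) (v : Int) : (pvOcc shape v).Nodup :=
  (pvOcc_pairwise shape v).imp (fun h => ne_of_lt h)

theorem pvFind?_eq_head?_filter {α : Type} (p : α → Bool) (l : List α) :
    l.find? p = (l.filter p).head? := by
  induction l with
  | nil => rfl
  | cons x xs ih =>
    by_cases h : p x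
    · rw [List.find?_cons_of_pos h, List.filter_cons_of_pos h, List.head?_cons]
    · rw [List.find?_cons_of_neg h, List.filter_cons_of_neg h, ih]

theorem pvFilter_snd (l : List (Int × Int)) (rs : Int) :
    l.filter (fun p => p.2 == rs)
      = ((l.filter (fun p => p.2 == rs)).map Prod.fst).map (fun i => (i, rs)) := by
  induction l with
  | nil => rfl
  | cons x xs ih =>
    rw [List.filter_cons]
    by_cases h : (x.2 == rs) = true
    · rw [if_pos h, List.map_cons, List.map_cons, ← ih]
      obtain ⟨a, b⟩ := x
      simp only [beq_iff_eq] at h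
      subst h
      rfl
    · rw [if_neg h]
      exact ih

theorem pvFilter_not_contained (xs : List Int) (c : Int → Bool) (K : Nat) (hnd : xs.Nodup)
    (H : ∀ i ∈ xs, (c i = true ↔ i ∈ xs.take K)) :
    xs.filter (fun i => !c i) = xs.drop K := by
  conv_lhs => rw [← List.take_append_drop K xs]
  rw [List.filter_append]
  have h1 : (xs.take K).filter (fun i => !c i) = [] := by
    rw [List.filter_eq_nil_iff]
    intro i hi
    have := (H i (List.mem_of_mem_take hi)).mpr hi
    simp [this]
  have h2 : (xs.drop K).filter (fun i => !c i) = xs.drop K := by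
    rw [List.filter_eq_self]
    intro i hi
    by_contra hc
    have hc' : c i = true := by simpa using hc
    have hmem : i ∈ xs.take K := (H i (List.mem_of_mem_drop hi)).mp hc'
    exact (List.disjoint_take_drop hnd le_rfl) hmem hi
  rw [h1, h2, List.nil_append]

theorem pvFind_char (shape : List Int) (used : PySem.Set Int) (rs : Int) (K : Nat)
    (H : ∀ i ∈ pvOcc shape rs, (PySem.Set.contains used i = true ↔ i ∈ (pvOcc shape rs).take K)) :
    (PySem.List.enumerate shape 0).find? (fun p => !(PySem.Set.contains used p.1) && p.2 == rs)
      = ((pvOcc shape rs)[K]?).map (fun i => (i, rs)) := by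
  rw [pvFind?_eq_head?_filter]
  have hsplit : (PySem.List.enumerate shape 0).filter (fun p => !(PySem.Set.contains used p.1) && p.2 == rs)
      = ((PySem.List.enumerate shape 0).filter (fun p => p.2 == rs)).filter
          (fun p => !(PySem.Set.contains used p.1)) := by
    rw [List.filter_filter]
  rw [hsplit, pvFilter_snd _ rs]
  show ((((pvOcc shape rs).map (fun i => (i, rs))).filter fun p => !PySem.Set.contains used p.1)).head? = _
  rw [List.filter_map, List.head?_map]
  have : (pvOcc shape rs).filter ((fun p => !PySem.Set.contains used p.1) ∘ (fun i => (i, rs)))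
      = (pvOcc shape rs).drop K := by
    exact pvFilter_not_contained _ _ _ (pvOcc_nodup shape rs) H
  rw [this, List.head?_drop]

/-- Loop invariant tying A's `used` set to B's `seen` cursors. -/
def pvInv (shape : List Int) (used : PySem.Set Int) (seen : PySem.Dict Int Int) : Prop :=
  (∀ v, 0 ≤ seen.getD v 0) ∧
  (∀ i, PySem.Set.contains used i = true ↔
        ∃ v, i ∈ (pvOcc shape v).take (seen.getD v 0).toNat)

theorem pvGo_eq (shape : List Int) :
    ∀ (rsl : List Int) (used : PySem.Set Int) (seen : PySem.Dict Int Int) (axes : List Int),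
      pvInv shape used seen →
      pvGoA shape rsl used axes = pvGoB (pvBuildOcc shape) rsl seen axes := by
  intro rsl
  induction rsl with
  | nil => intro used seen axes _; rfl
  | cons rs rest ih =>
    intro used seen axes hInv
    obtain ⟨hpos, hmem⟩ := hInv
    set k : Int := seen.getD rs 0 with hk
    set K : Nat := k.toNat with hK
    have hk0 : 0 ≤ k := hpos rs
    have hkK : k = (K : Int) := by omega
    set xs : List Int := pvOcc shape rs with hxs
    have H : ∀ i ∈ xs, (PySem.Set.contains used i = true ↔ i ∈ xs.take K) := by
      intro i hi
      rw [hmem i]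
      constructor
      · rintro ⟨v, hv⟩
        have hv' : i ∈ pvOcc shape v := List.mem_of_mem_take hv
        have := pvOcc_val_unique shape hv' hi
        subst this
        exact hv
      · intro h; exact ⟨rs, h⟩
    rw [show pvGoA shape (rs :: rest) used axes
        = match (PySem.List.enumerate shape 0).find?
            (fun p => !(PySem.Set.contains used p.1) && p.2 == rs) with
          | none => none
          | some p => pvGoA shape rest (PySem.Set.add used p.1) (axes ++ [p.1]) from rfl]
    rw [pvFind_char shape used rs K H]
    rw [show pvGoB (pvBuildOcc shape) (rs :: rest) seen axes
        = (if (((pvBuildOcc shape).getD rs []).length : Int) ≤ seen.getD rs 0 then none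
           else pvGoB (pvBuildOcc shape) rest (seen.insert rs (seen.getD rs 0 + 1))
                (axes ++ [PySem.List.pyGetD ((pvBuildOcc shape).getD rs []) (seen.getD rs 0) 0]))
        from rfl]
    rw [pvOcc_getD shape rs, ← hxs, ← hk]
    by_cases hlen : xs.length ≤ K
    · rw [List.getElem?_eq_none hlen]
      have : (xs.length : Int) ≤ k := by omega
      simp [this]
    · rw [not_le] at hlen
      rw [List.getElem?_eq_getElem hlen]
      have hnotle : ¬ ((xs.length : Int) ≤ k) := by omega
      rw [if_neg hnotle]
      simp only [Option.map_some]
      have hget : PySem.List.pyGetD xs k 0 = xs[K] := by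
        rw [hkK, PySem.List.pyGetD_natCast, List.getD_eq_getElem _ _ hlen]
      rw [hget]
      apply ih
      constructor
      · intro v
        rw [PySem.Dict.getD_insert]
        split
        · omega
        · exact hpos v
      · intro i
        rw [PySem.Set.contains_iff, PySem.Set.mem_add, ← PySem.Set.contains_iff, hmem i]
        have htake : xs.take (K + 1) = xs.take K ++ [xs[K]] := by
          rw [List.take_add_one, List.getElem?_eq_getElem hlen]
          rfl
        constructor
        · rintro (⟨v, hv⟩ | rfl)
          · refine ⟨v, ?_⟩
            rw [PySem.Dict.getD_insert]
            split
            · rename_i hveq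
              subst hveq
              have : ((k + 1).toNat) = K + 1 := by omega
              rw [this, ← hxs, htake]
              have : i ∈ xs.take K := by rw [← hxs] at hv; exact hv
              exact List.mem_append_left _ this
            · exact hv
          · refine ⟨rs, ?_⟩
            rw [PySem.Dict.getD_insert, if_pos rfl]
            have : ((k + 1).toNat) = K + 1 := by omega
            rw [this, ← hxs, htake]
            exact List.mem_append_right _ (List.mem_singleton.mpr rfl)
        · rintro ⟨v, hv⟩
          rw [PySem.Dict.getD_insert] at hv
          by_cases hveq : v = rs
          · rw [if_pos hveq] at hv
            have : ((k + 1).toNat) = K + 1 := by omega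
            rw [this, hveq, ← hxs, htake] at hv
            rcases List.mem_append.mp hv with h | h
            · exact Or.inl ⟨rs, by rw [← hxs]; exact h⟩
            · exact Or.inr (List.mem_singleton.mp h)
          · rw [if_neg hveq] at hv
            exact Or.inl ⟨v, hv⟩

-- ===== VERDICT (by name: the statement is the Claim_ definition above) =====
theorem infer_reduction_axes_from_shape_py_spec : Claim_equal_infer_reduction_axes_from_shape_py := by
  intro shape reduction_sizes _
  show infer_reduction_axes_from_shape_py shape reduction_sizes
      = infer_reduction_axes_from_shape_py_alt shape reduction_sizes
  unfold infer_reduction_axes_from_shape_py infer_reduction_axes_from_shape_py_alt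
  apply pvGo_eq
  constructor
  · intro v; simp [PySem.Dict.getD_empty]
  · intro i
    constructor
    · intro h; simp [PySem.Set.empty] at h
    · rintro ⟨v, hv⟩
      simp [PySem.Dict.getD_empty] at hv
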